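-- pv_equiv track=rewrite | github.com/TheBeaNerd/phase | phase.py | stage
-- ===== SOURCE A (Python) =====
-- def ppulse(time=0,delay=0,lnperiod=0):
--     assert(lnperiod >= 0)
--     if (lnperiod == 0):
--         return 1
--     radius = 2 ** (lnperiod - 1)
--     q = (time + delay) // radius
--     s = 2 * (1 - (q % 2)) - 1
--     return s if (((time + delay) % radius) == 0) else 0
--
-- def pwave(delay=0,lnperiod=0,lnframe=0):
--     return [ppulse(time=time,delay=delay,lnperiod=lnperiod) for time in range(0,2 ** lnframe)]
--
-- def IM(lnframe=0):
--     """Identity Matrix"""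
--     size = 2 ** lnframe
--     return [[(1 if (row == col) else 0) for row in range(0,size)] for col in range(0,size)]
--
-- def lnrange(lnperiod=0):
--     if (lnperiod < 1):
--         return range(0,1)
--     return range(0,2 ** (lnperiod - 1))
--
-- def lnprange(lnframe=0):
--     return (i for j in (range(1,lnframe+1), range(0,1)) for i in j)
--
-- def SM(lnframe=0):
--     """Square Matrix"""
--     if (lnframe <= 0):
--         return [[1]]
--     return [pwave(delay=delay,lnperiod=lnperiod,lnframe=lnframe)  for lnperiod in lnprange(lnframe) for delay in lnrange(lnperiod)]
--
-- def pad(m=[[]],pre=0,post=0):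
--     prepad = [0 for _ in range(0,pre)]
--     postpad = [0 for _ in range(0,post)]
--     return [prepad + row + postpad for row in m]
--
-- def stage(lnstage=0,lnframe=0):
--     if (lnstage == 0):
--         return SM(lnframe)
--     if (lnstage >= lnframe):
--         return IM(lnframe)
--     pre  = 0
--     mid  = 0
--     res = []
--     ##post = (2 ** lnframe) - (pre + mid)
--     for lnperiod in range(0,lnframe):
--         pre = pre + mid
--         mid = 2 ** lnperiod
--         post = (2 ** lnframe) - (pre + mid)
--         res += pad(stage(lnstage-1,lnperiod),pre=pre,post=post)
--     pre = pre + mid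
--     mid = 1
--     post = (2 ** lnframe) - (pre + mid)
--     res += pad([[1]],pre=pre,post=post)
--     return res
-- ===== SOURCE B (Python) =====
-- def ppulse(time=0, delay=0, lnperiod=0):
--     assert lnperiod >= 0
--     if lnperiod == 0:
--         return 1
--     radius = 2 ** (lnperiod - 1)
--     if (time + delay) % radius != 0:
--         return 0
--     return 1 if ((time + delay) // radius) % 2 == 0 else -1
--
-- def entry(s=0, f=0, r=0, c=0):
--     """Value of stage(s, f)[r][c], by descending the nested diagonal blocks."""
--     while 0 < s < f:
--         if r == (1 << f) - 1:           # trailing 1x1 block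
--             return 1 if c == (1 << f) - 1 else 0
--         p = (r + 1).bit_length() - 1    # block holding row r, offset 2**p - 1
--         off = (1 << p) - 1
--         if not (off <= c < off + (1 << p)):
--             return 0
--         r -= off
--         c -= off
--         f = p
--         s -= 1
--     if s == 0 and f > 0:                # Walsh/phase-wave block SM(f)
--         if r == (1 << f) - 1:
--             return 1                    # lnperiod == 0 row: all ones
--         l = (r + 1).bit_length()        # lnperiod in 1..f
--         return ppulse(time=c, delay=r + 1 - (1 << (l - 1)), lnperiod=l)
--     return 1 if r == c else 0           # identity block
--
-- def stage(lnstage=0, lnframe=0):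
--     if lnframe <= 0:
--         return [[1]]
--     size = 1 << lnframe
--     return [[entry(lnstage, lnframe, r, c) for c in range(size)] for r in range(size)]
-- ===== Notes on version B (the rewrite author's own statement) =====
-- stated objective: alternative
-- what changed: B computes each matrix entry independently by a closed-form positional descent: for every (row, col) it locates the nested diagonal block via bit_length addressing (p = (r+1).bit_length()-1, offset 2**p-1) in an iterative while-loop, ending in a direct ppulse/identity formula; A instead recursively builds whole sub-matrices and concatenates zero-padded copies of their rows.
import Mathlib
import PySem

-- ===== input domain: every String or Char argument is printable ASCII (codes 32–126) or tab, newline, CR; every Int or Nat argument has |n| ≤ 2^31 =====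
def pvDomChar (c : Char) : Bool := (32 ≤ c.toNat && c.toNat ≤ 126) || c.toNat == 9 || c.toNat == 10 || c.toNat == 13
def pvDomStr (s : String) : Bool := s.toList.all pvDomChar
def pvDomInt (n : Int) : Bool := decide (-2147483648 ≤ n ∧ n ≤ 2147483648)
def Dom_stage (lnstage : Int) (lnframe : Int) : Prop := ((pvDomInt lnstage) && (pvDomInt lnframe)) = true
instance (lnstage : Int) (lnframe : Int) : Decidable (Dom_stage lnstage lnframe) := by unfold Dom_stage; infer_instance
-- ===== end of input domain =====

-- B replaces A's recursive build-and-concatenate of zero-padded sub-matrices by a pointwise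
-- closed form: each entry is computed independently by an iterative positional descent through
-- the nested diagonal blocks (bit_length addressing) — objective: alternative algorithm.

-- ===== PORT A =====
-- '2 ** e' is ported as '2 ^ e.toNat' — exact for e ≥ 0; the only calls with e < 0 are in the
-- region where Python raises TypeError, excluded by Pre_stage.
def ppulse (time : Int) (delay : Int) (lnperiod : Int) : Int :=
  -- 'assert lnperiod >= 0' never fires on the calls reachable inside Pre_stage
  if lnperiod = 0 then 1
  else
    let radius : Int := 2 ^ (lnperiod - 1).toNat
    let q := PySem.Int.floordiv (time + delay) radius
    let s := 2 * (1 - (PySem.Int.mod q 2)) - 1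
    if PySem.Int.mod (time + delay) radius = 0 then s else 0

def pwave (delay : Int) (lnperiod : Int) (lnframe : Int) : List Int :=
  (PySem.List.pyRange 0 ((2:Int) ^ lnframe.toNat) 1).map (fun time => ppulse time delay lnperiod)

def IM (lnframe : Int) : List (List Int) :=
  let size : Int := 2 ^ lnframe.toNat
  (PySem.List.pyRange 0 size 1).map (fun col =>
    (PySem.List.pyRange 0 size 1).map (fun row => if row = col then 1 else 0))

def lnrange (lnperiod : Int) : List Int :=
  if lnperiod < 1 then PySem.List.pyRange 0 1 1
  else PySem.List.pyRange 0 ((2:Int) ^ (lnperiod - 1).toNat) 1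

def lnprange (lnframe : Int) : List Int :=
  PySem.List.pyRange 1 (lnframe + 1) 1 ++ PySem.List.pyRange 0 1 1

def SM (lnframe : Int) : List (List Int) :=
  if lnframe ≤ 0 then [[1]]
  else (lnprange lnframe).flatMap (fun lnperiod =>
    (lnrange lnperiod).map (fun delay => pwave delay lnperiod lnframe))

-- '[0 for _ in range(0, pre)]' = List.replicate pre.toNat 0 (exact: range(0,k) is empty for k < 0)
def pad (m : List (List Int)) (pre : Int) (post : Int) : List (List Int) :=
  let prepad : List Int := List.replicate pre.toNat 0
  let postpad : List Int := List.replicate post.toNat 0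
  m.map (fun row => prepad ++ row ++ postpad)

def stage (lnstage : Int) (lnframe : Int) : List (List Int) :=
  if lnstage = 0 then SM lnframe
  else if lnstage ≥ lnframe then IM lnframe
  else
    let st := (PySem.List.pyRange 0 lnframe 1).attach.foldl
      (fun (st : Int × Int × List (List Int)) (lp : {x // x ∈ PySem.List.pyRange 0 lnframe 1}) =>
        let pre := st.1 + st.2.1
        let mid : Int := 2 ^ lp.val.toNat
        let post := (2:Int) ^ lnframe.toNat - (pre + mid)
        (pre, mid, st.2.2 ++ pad (stage (lnstage - 1) lp.val) pre post))
      ((0, 0, []) : Int × Int × List (List Int))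
    let pre := st.1 + st.2.1
    let post := (2:Int) ^ lnframe.toNat - (pre + 1)
    st.2.2 ++ pad [[1]] pre post
termination_by lnframe.toNat
decreasing_by
  have h0 := (PySem.List.mem_pyRange_one).1 lp.property
  omega

-- ===== PORT B =====
def ppulse_alt (time : Int) (delay : Int) (lnperiod : Int) : Int :=
  if lnperiod = 0 then 1
  else
    let radius : Int := 2 ^ (lnperiod - 1).toNat
    if PySem.Int.mod (time + delay) radius ≠ 0 then 0
    else if PySem.Int.mod (PySem.Int.floordiv (time + delay) radius) 2 = 0 then 1 else -1

-- '(r+1).bit_length() - 1' is ported as 'Nat.log2 (r+1).toNat' — exact since r ≥ 0 on every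
-- call B makes; '1 << f' is ported as '2 ^ f.toNat' — exact since f > 0 in both branches used.
def entry (s : Int) (f : Int) (r : Int) (c : Int) : Int :=
  if h : 0 < s ∧ s < f then
    -- one iteration of B's while-loop
    if r = 2 ^ f.toNat - 1 then (if c = 2 ^ f.toNat - 1 then 1 else 0)
    else
      let p : Nat := Nat.log2 (r + 1).toNat
      let off : Int := 2 ^ p - 1
      if off ≤ c ∧ c < off + 2 ^ p then entry (s - 1) (p : Int) (r - off) (c - off) else 0
  else if s = 0 ∧ 0 < f then
    if r = 2 ^ f.toNat - 1 then 1
    else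
      let l : Nat := Nat.log2 (r + 1).toNat + 1
      ppulse_alt c (r + 1 - 2 ^ (l - 1)) (l : Int)
  else if r = c then 1 else 0
termination_by s.toNat
decreasing_by omega

def stage_alt (lnstage : Int) (lnframe : Int) : List (List Int) :=
  if lnframe ≤ 0 then [[1]]
  else
    let size : Int := 2 ^ lnframe.toNat
    (PySem.List.pyRange 0 size 1).map (fun r =>
      (PySem.List.pyRange 0 size 1).map (fun c => entry lnstage lnframe r c))

-- ===== PRECONDITION & SPEC =====
-- Pre_stage excludes exactly the inputs where Python A raises TypeError: lnframe < 0 with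
-- lnstage ≠ 0 makes '2 ** lnframe' a float and range()/pad() reject it.
def Pre_stage (lnstage : Int) (lnframe : Int) : Prop := 0 ≤ lnframe ∨ lnstage = 0
instance (lnstage : Int) (lnframe : Int) : Decidable (Pre_stage lnstage lnframe) := by
  unfold Pre_stage; infer_instance

def pvWitness_stage : Int × Int := (1, 2)

def Spec_stage (lnstage : Int) (lnframe : Int) (out : List (List Int)) : Prop := out = stage_alt lnstage lnframe
instance (lnstage : Int) (lnframe : Int) (out : List (List Int)) : Decidable (Spec_stage lnstage lnframe out) := by unfold Spec_stage; infer_instance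

-- ===== CLAIM (what is proved, stated in full; the proofs are below) =====
def Claim_equal_stage : Prop := ∀ (lnstage : Int) (lnframe : Int), Dom_stage lnstage lnframe → Pre_stage lnstage lnframe → Spec_stage lnstage lnframe (stage lnstage lnframe)

-- ===== LEMMAS AND PROOFS =====

theorem ppulse_eq (time delay lnperiod : Int) : ppulse time delay lnperiod = ppulse_alt time delay lnperiod := by
  unfold ppulse ppulse_alt
  split_ifs with h
  · rfl
  · rcases PySem.Int.mod_two_eq (PySem.Int.floordiv (time + delay) (2 ^ (lnperiod - 1).toNat)) with hm | hm <;>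
      simp only [hm] <;> split_ifs <;> omega

theorem toNat_two_pow (k : Nat) : ((2:Int) ^ k).toNat = 2 ^ k := by
  rw [show ((2:Int) ^ k) = ((2 ^ k : Nat) : Int) by push_cast; ring, Int.toNat_natCast]

-- the loop body of A's recursive branch, as a named function
def stepA (lnstage lnframe : Int) (st : Int × Int × List (List Int)) (p : Int) :
    Int × Int × List (List Int) :=
  (st.1 + st.2.1, 2 ^ p.toNat,
    st.2.2 ++ pad (stage (lnstage - 1) p) (st.1 + st.2.1)
      ((2:Int) ^ lnframe.toNat - (st.1 + st.2.1 + 2 ^ p.toNat)))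

def recAfold (lnstage lnframe : Int) : Int × Int × List (List Int) :=
  (PySem.List.pyRange 0 lnframe 1).foldl (stepA lnstage lnframe) (0, 0, [])

theorem stage_rec (lnstage lnframe : Int) (h0 : ¬ lnstage = 0) (h1 : ¬ lnstage ≥ lnframe) :
    stage lnstage lnframe =
      (recAfold lnstage lnframe).2.2 ++
        pad [[1]] ((recAfold lnstage lnframe).1 + (recAfold lnstage lnframe).2.1)
          ((2:Int) ^ lnframe.toNat -
            ((recAfold lnstage lnframe).1 + (recAfold lnstage lnframe).2.1 + 1)) := by
  rw [stage]
  simp only [if_neg h0, if_neg h1]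
  have hA : (fun (st : Int × Int × List (List Int))
        (lp : {x // x ∈ PySem.List.pyRange 0 lnframe 1}) =>
        (st.1 + st.2.1, (2:Int) ^ lp.val.toNat,
          st.2.2 ++ pad (stage (lnstage - 1) lp.val) (st.1 + st.2.1)
            ((2:Int) ^ lnframe.toNat - (st.1 + st.2.1 + 2 ^ lp.val.toNat))))
      = (fun st lp => stepA lnstage lnframe st lp.val) := rfl
  rw [hA, List.foldl_attach]
  rfl

def blockA (lnstage lnframe : Int) (p : Int) : List (List Int) :=
  pad (stage (lnstage - 1) p) ((2:Int) ^ p.toNat - 1)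
    ((2:Int) ^ lnframe.toNat - ((2:Int) ^ p.toNat - 1 + 2 ^ p.toNat))

theorem A_loop (lnstage lnframe : Int) :
    ∀ (d : Nat) (a : Int), (lnframe - a).toNat = d → 0 ≤ a → a ≤ lnframe →
      ∀ (pre mid : Int) (res : List (List Int)), pre + mid = (2:Int) ^ a.toNat - 1 →
      ((PySem.List.pyRange a lnframe 1).foldl (stepA lnstage lnframe) (pre, mid, res)).1 +
          ((PySem.List.pyRange a lnframe 1).foldl (stepA lnstage lnframe) (pre, mid, res)).2.1
          = (2:Int) ^ lnframe.toNat - 1 ∧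
        ((PySem.List.pyRange a lnframe 1).foldl (stepA lnstage lnframe) (pre, mid, res)).2.2
          = res ++ (PySem.List.pyRange a lnframe 1).flatMap (blockA lnstage lnframe) := by
  intro d
  induction d with
  | zero =>
    intro a hd h0 h1 pre mid res hpm
    have ha : a = lnframe := by omega
    subst ha
    rw [PySem.List.pyRange_one_eq_nil (le_refl a)]
    simpa using hpm
  | succ d ihd =>
    intro a hd h0 h1 pre mid res hpm
    have hlt : a < lnframe := by omega
    rw [PySem.List.pyRange_one_cons hlt]
    simp only [List.foldl_cons]
    have hstep : stepA lnstage lnframe (pre, mid, res) a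
        = (pre + mid, (2:Int) ^ a.toNat, res ++ blockA lnstage lnframe a) := by
      simp only [stepA, blockA, hpm]
    rw [hstep]
    have hp2 : ((2:Int) ^ (a + 1).toNat) = 2 * 2 ^ a.toNat := by
      rw [show (a + 1).toNat = a.toNat + 1 by omega, pow_succ]; ring
    have hsum : (pre + mid) + (2:Int) ^ a.toNat = (2:Int) ^ (a + 1).toNat - 1 := by
      rw [hp2]; linarith
    obtain ⟨ih1, ih2⟩ := ihd (a + 1) (by omega) (by omega) (by omega)
      (pre + mid) ((2:Int) ^ a.toNat) (res ++ blockA lnstage lnframe a) hsum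
    refine ⟨ih1, ?_⟩
    rw [ih2, List.flatMap_cons, List.append_assoc]

-- A's recursive branch, closed form: the padded blocks followed by the trailing unit row
theorem stage_unfold (lnstage lnframe : Int) (h0 : ¬ lnstage = 0) (h1 : ¬ lnstage ≥ lnframe)
    (hf : 0 ≤ lnframe) :
    stage lnstage lnframe =
      (PySem.List.pyRange 0 lnframe 1).flatMap (blockA lnstage lnframe) ++
        [List.replicate (2 ^ lnframe.toNat - 1) 0 ++ [1]] := by
  obtain ⟨hsum, hres⟩ := A_loop lnstage lnframe (lnframe - 0).toNat 0 rfl (le_refl 0) hf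
    0 0 [] (by norm_num)
  have hS : (recAfold lnstage lnframe).1 + (recAfold lnstage lnframe).2.1
      = (2:Int) ^ lnframe.toNat - 1 := hsum
  have hR : (recAfold lnstage lnframe).2.2
      = [] ++ (PySem.List.pyRange 0 lnframe 1).flatMap (blockA lnstage lnframe) := hres
  have ht1 : ((2:Int) ^ lnframe.toNat - 1).toNat = 2 ^ lnframe.toNat - 1 := by
    have := toNat_two_pow lnframe.toNat
    omega
  rw [stage_rec lnstage lnframe h0 h1, hR, hS]
  simp [pad, ht1]

-- shift a range-map to start at 0
theorem map_pyRange_shift {α : Type} (a b : Int) (G : Int → α) :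
    (PySem.List.pyRange a b 1).map G = (PySem.List.pyRange 0 (b - a) 1).map (fun i => G (a + i)) := by
  rw [PySem.List.pyRange_one, PySem.List.pyRange_one]
  simp only [Int.sub_zero, List.map_map]
  exact List.map_congr_left fun k _ => by simp [Function.comp]

theorem map_const_pyRange (a b : Int) (v : Int) :
    (PySem.List.pyRange a b 1).map (fun _ => v) = List.replicate (b - a).toNat v := by
  rw [List.map_const', PySem.List.length_pyRange_one]

-- a guarded column map is a zero-padded row
theorem colSplit (N off w : Int) (h0 : 0 ≤ off) (hw : 0 ≤ w) (hN : off + w ≤ N)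
    (h : Int → Int) :
    (PySem.List.pyRange 0 N 1).map (fun c => if off ≤ c ∧ c < off + w then h (c - off) else 0)
      = List.replicate off.toNat 0 ++ (PySem.List.pyRange 0 w 1).map h ++
          List.replicate (N - (off + w)).toNat 0 := by
  have e1 : (PySem.List.pyRange 0 off 1).map
      (fun c => if off ≤ c ∧ c < off + w then h (c - off) else 0)
      = List.replicate off.toNat 0 := by
    have hz : (PySem.List.pyRange 0 off 1).map
        (fun c => if off ≤ c ∧ c < off + w then h (c - off) else 0)
        = (PySem.List.pyRange 0 off 1).map (fun _ => 0) := by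
      refine List.map_congr_left fun c hc => ?_
      have := (PySem.List.mem_pyRange_one).1 hc
      rw [if_neg (by omega)]
    rw [hz, map_const_pyRange, show off - 0 = off by ring]
  have e2 : (PySem.List.pyRange off (off + w) 1).map
      (fun c => if off ≤ c ∧ c < off + w then h (c - off) else 0)
      = (PySem.List.pyRange 0 w 1).map h := by
    rw [map_pyRange_shift, show off + w - off = w by ring]
    refine List.map_congr_left fun i hi => ?_
    have := (PySem.List.mem_pyRange_one).1 hi
    rw [if_pos (by omega), show off + i - off = i by ring]
  have e3 : (PySem.List.pyRange (off + w) N 1).map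
      (fun c => if off ≤ c ∧ c < off + w then h (c - off) else 0)
      = List.replicate (N - (off + w)).toNat 0 := by
    have hz : (PySem.List.pyRange (off + w) N 1).map
        (fun c => if off ≤ c ∧ c < off + w then h (c - off) else 0)
        = (PySem.List.pyRange (off + w) N 1).map (fun _ => 0) := by
      refine List.map_congr_left fun c hc => ?_
      have := (PySem.List.mem_pyRange_one).1 hc
      rw [if_neg (by omega)]
    rw [hz, map_const_pyRange]
  rw [PySem.List.pyRange_one_append 0 off N h0 (by omega),
      PySem.List.pyRange_one_append off (off + w) N (by omega) (by omega),
      List.map_append, List.map_append, e1, e2, e3, List.append_assoc]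

-- the unit row as a column map
theorem unitRow (N : Int) (hN : 1 ≤ N) :
    (PySem.List.pyRange 0 N 1).map (fun c => if c = N - 1 then (1:Int) else 0)
      = List.replicate (N - 1).toNat 0 ++ [1] := by
  have e1 : (PySem.List.pyRange 0 (N - 1) 1).map
      (fun c => if c = N - 1 then (1:Int) else 0)
      = List.replicate (N - 1).toNat 0 := by
    have hz : (PySem.List.pyRange 0 (N - 1) 1).map
        (fun c => if c = N - 1 then (1:Int) else 0)
        = (PySem.List.pyRange 0 (N - 1) 1).map (fun _ => 0) := by
      refine List.map_congr_left fun c hc => ?_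
      have := (PySem.List.mem_pyRange_one).1 hc
      rw [if_neg (by omega)]
    rw [hz, map_const_pyRange, show N - 1 - 0 = N - 1 by ring]
  rw [show N = (N - 1) + 1 by ring, PySem.List.pyRange_one_succ_right (by omega),
      List.map_append, show N - 1 + 1 - 1 = N - 1 by ring, e1]
  simp

theorem log2_pow_add (p i : Nat) (h : i < 2 ^ p) : Nat.log2 (2 ^ p + i) = p := by
  rw [Nat.log2_eq_log_two]
  refine Nat.log_eq_of_pow_le_of_lt_pow (by omega) ?_
  rw [pow_succ]
  omega

-- blocks of widths 2^p at offsets 2^p - 1 plus a trailing row tile a 2^fN-indexed map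
theorem rowSplit (fN : Nat) (G : Int → List Int) (Bk : Int → List (List Int))
    (hB : ∀ p : Int, 0 ≤ p → p < (fN:Int) →
      Bk p = (PySem.List.pyRange 0 ((2:Int) ^ p.toNat) 1).map
        (fun i => G ((2:Int) ^ p.toNat - 1 + i))) :
    (PySem.List.pyRange 0 (fN:Int) 1).flatMap Bk ++ [G ((2:Int) ^ fN - 1)]
      = (PySem.List.pyRange 0 ((2:Int) ^ fN) 1).map G := by
  have key : ∀ k : Nat, k ≤ fN →
      (PySem.List.pyRange 0 (k:Int) 1).flatMap Bk
        = (PySem.List.pyRange 0 ((2:Int) ^ k - 1) 1).map G := by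
    intro k
    induction k with
    | zero => intro _; simp [PySem.List.pyRange_one_eq_nil]
    | succ k ih =>
      intro hk
      have hsplit : PySem.List.pyRange 0 ((2:Int) ^ (k + 1) - 1) 1
          = PySem.List.pyRange 0 ((2:Int) ^ k - 1) 1 ++
            PySem.List.pyRange ((2:Int) ^ k - 1) ((2:Int) ^ (k + 1) - 1) 1 := by
        have hp := pow_pos (by norm_num : (0:Int) < 2) k
        have hp1 := pow_pos (by norm_num : (0:Int) < 2) (k + 1)
        refine PySem.List.pyRange_one_append 0 _ _ (by omega) ?_
        have : (2:Int) ^ k ≤ 2 ^ (k + 1) := pow_le_pow_right₀ (by norm_num) (by omega)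
        omega
      rw [show ((k + 1 : Nat) : Int) = (k:Int) + 1 by push_cast; ring,
          PySem.List.pyRange_one_succ_right (by positivity), List.flatMap_append,
          ih (by omega), hsplit, List.map_append]
      congr 1
      rw [map_pyRange_shift]
      have hBk := hB k (by positivity) (by exact_mod_cast Nat.lt_of_lt_of_le (Nat.lt_succ_self k) hk)
      simp only [Int.toNat_natCast] at hBk
      rw [show ((2:Int) ^ (k + 1) - 1 - ((2:Int) ^ k - 1)) = 2 ^ k by rw [pow_succ]; ring]
      simp [hBk]
  have hfull : PySem.List.pyRange 0 ((2:Int) ^ fN) 1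
      = PySem.List.pyRange 0 ((2:Int) ^ fN - 1) 1 ++ [(2:Int) ^ fN - 1] := by
    have hp := pow_pos (by norm_num : (0:Int) < 2) fN
    conv_lhs => rw [show ((2:Int) ^ fN) = ((2:Int) ^ fN - 1) + 1 by ring]
    exact PySem.List.pyRange_one_succ_right (a := 0) (b := (2:Int) ^ fN - 1) (by omega)
  rw [hfull, List.map_append, key fN le_rfl]
  simp

-- B's matrix is the pointwise entry map, also in the degenerate frame (f ≤ 0)
theorem stage_alt_matrix (s f : Int) (hf : 0 ≤ f) :
    stage_alt s f = (PySem.List.pyRange 0 ((2:Int) ^ f.toNat) 1).map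
      (fun r => (PySem.List.pyRange 0 ((2:Int) ^ f.toNat) 1).map (fun c => entry s f r c)) := by
  by_cases h : f ≤ 0
  · have hf0 : f = 0 := by omega
    subst hf0
    rw [stage_alt, if_pos (le_refl (0:Int))]
    have hr : PySem.List.pyRange 0 ((2:Int) ^ (0:Int).toNat) 1 = [0] := by
      norm_num [PySem.List.pyRange_one, List.range_one]
    have he : entry s 0 0 0 = 1 := by
      rw [entry]
      have h1 : ¬ ((0:Int) < s ∧ s < 0) := by omega
      rw [dif_neg h1]
      norm_num
    rw [hr]
    simp only [List.map_cons, List.map_nil, he]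
  · rw [stage_alt, if_neg h]

-- rowSplit with an Int-valued frame
theorem rowSplit' (f : Int) (hf : 0 ≤ f) (G : Int → List Int) (Bk : Int → List (List Int))
    (hB : ∀ p : Int, 0 ≤ p → p < f →
      Bk p = (PySem.List.pyRange 0 ((2:Int) ^ p.toNat) 1).map
        (fun i => G ((2:Int) ^ p.toNat - 1 + i))) :
    (PySem.List.pyRange 0 f 1).flatMap Bk ++ [G ((2:Int) ^ f.toNat - 1)]
      = (PySem.List.pyRange 0 ((2:Int) ^ f.toNat) 1).map G := by
  have h := rowSplit f.toNat G Bk (fun p hp0 hp1 => hB p hp0 (by omega))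
  rwa [show ((f.toNat : Nat) : Int) = f by omega] at h

-- entry, unfolded once in each of its four reachable shapes
theorem entry_eq_descend (s f r c : Int) (hs : 0 < s) (hsf : s < f)
    (hr : r ≠ 2 ^ f.toNat - 1) :
    entry s f r c =
      (if (2:Int) ^ Nat.log2 (r + 1).toNat - 1 ≤ c ∧
          c < (2:Int) ^ Nat.log2 (r + 1).toNat - 1 + 2 ^ Nat.log2 (r + 1).toNat
       then entry (s - 1) ((Nat.log2 (r + 1).toNat : Nat) : Int)
              (r - ((2:Int) ^ Nat.log2 (r + 1).toNat - 1))
              (c - ((2:Int) ^ Nat.log2 (r + 1).toNat - 1))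
       else 0) := by
  rw [entry, dif_pos ⟨hs, hsf⟩, if_neg hr]

theorem entry_eq_last (s f c : Int) (hs : 0 < s) (hsf : s < f) :
    entry s f (2 ^ f.toNat - 1) c = (if c = 2 ^ f.toNat - 1 then 1 else 0) := by
  rw [entry, dif_pos ⟨hs, hsf⟩, if_pos rfl]

theorem entry_eq_sm (f r c : Int) (hf : 0 < f) (hr : r ≠ 2 ^ f.toNat - 1) :
    entry 0 f r c =
      ppulse_alt c (r + 1 - 2 ^ (Nat.log2 (r + 1).toNat + 1 - 1))
        ((Nat.log2 (r + 1).toNat + 1 : Nat) : Int) := by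
  rw [entry, dif_neg (by omega), if_pos ⟨rfl, hf⟩, if_neg hr]

theorem entry_eq_sm_last (f c : Int) (hf : 0 < f) :
    entry 0 f (2 ^ f.toNat - 1) c = 1 := by
  rw [entry, dif_neg (by omega), if_pos ⟨rfl, hf⟩, if_pos rfl]

theorem entry_eq_id (s f r c : Int) (h1 : ¬ (0 < s ∧ s < f)) (h2 : ¬ (s = 0 ∧ 0 < f)) :
    entry s f r c = if r = c then 1 else 0 := by
  rw [entry, dif_neg h1, if_neg h2]

theorem pyRange01 : PySem.List.pyRange 0 1 1 = [0] := by
  norm_num [PySem.List.pyRange_one, List.range_one]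

-- the block row index 2^p - 1 + i is never the last row of the 2^f frame, and its log2 is p
theorem blockrow_facts (p fN : Nat) (i : Int) (hp : p + 1 ≤ fN) (hi0 : 0 ≤ i)
    (hi : i < (2:Int) ^ p) :
    ((2:Int) ^ p - 1 + i ≠ 2 ^ fN - 1) ∧
      Nat.log2 (((2:Int) ^ p - 1 + i) + 1).toNat = p := by
  have hpn := toNat_two_pow p
  have hfn := toNat_two_pow fN
  have h2 : (2:Nat) ^ (p + 1) ≤ 2 ^ fN := Nat.pow_le_pow_right (by omega) hp
  have h2' : (2:Nat) ^ (p + 1) = 2 ^ p * 2 := by rw [pow_succ]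
  have hpos := Nat.two_pow_pos p
  constructor
  · intro hEq
    have : ((2:Int) ^ p - 1 + i).toNat = ((2:Int) ^ fN - 1).toNat := by rw [hEq]
    omega
  · have ht : (((2:Int) ^ p - 1 + i) + 1).toNat = 2 ^ p + i.toNat := by omega
    rw [ht, log2_pow_add p i.toNat (by omega)]

theorem main_eq : ∀ (n : Nat) (s f : Int), f.toNat = n → (0 ≤ f ∨ s = 0) →
    stage s f = stage_alt s f := by
  intro n
  induction n using Nat.strong_induction_on with
  | _ n ih =>
  intro s f hn hpre
  by_cases hs0 : s = 0
  · -- base case A: SM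
    subst hs0
    rw [show stage 0 f = SM f from by rw [stage]; simp]
    by_cases hf0 : f ≤ 0
    · rw [SM, if_pos hf0, stage_alt, if_pos hf0]
    · push_neg at hf0
      have hfpow := Nat.two_pow_pos f.toNat
      rw [stage_alt_matrix 0 f (by omega), SM, if_neg (by omega), lnprange,
          List.flatMap_append, pyRange01]
      simp only [List.flatMap_cons, List.flatMap_nil, List.append_nil]
      have hlast : (lnrange 0).map (fun delay => pwave delay 0 f)
          = [(PySem.List.pyRange 0 ((2:Int) ^ f.toNat) 1).map
              (fun c => entry 0 f ((2:Int) ^ f.toNat - 1) c)] := by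
        rw [lnrange, if_pos (by norm_num), pyRange01]
        simp only [List.map_cons, List.map_nil]
        congr 1
        rw [pwave]
        refine List.map_congr_left fun t _ => ?_
        rw [show ppulse t 0 0 = 1 from by rw [ppulse]; norm_num,
            entry_eq_sm_last f t hf0]
      rw [hlast]
      have hshift : (PySem.List.pyRange 1 (f + 1) 1).flatMap
            (fun lnperiod => (lnrange lnperiod).map (fun delay => pwave delay lnperiod f))
          = (PySem.List.pyRange 0 f 1).flatMap
            (fun p => (lnrange (1 + p)).map (fun delay => pwave delay (1 + p) f)) := by
        rw [List.flatMap_def, map_pyRange_shift, show f + 1 - 1 = f by ring,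
            ← List.flatMap_def]
      rw [hshift]
      refine rowSplit' f (by omega)
        (fun r => (PySem.List.pyRange 0 ((2:Int) ^ f.toNat) 1).map (fun c => entry 0 f r c))
        (fun p => (lnrange (1 + p)).map (fun delay => pwave delay (1 + p) f))
        (fun p hp0 hpf => ?_)
      simp only [lnrange, if_neg (show ¬ (1 + p < 1) by omega), show 1 + p - 1 = p by ring]
      refine List.map_congr_left fun i hi => ?_
      have hi' := (PySem.List.mem_pyRange_one).1 hi
      obtain ⟨hne, hlog⟩ := blockrow_facts p.toNat f.toNat i (by omega) hi'.1 hi'.2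
      rw [pwave]
      refine List.map_congr_left fun t _ => ?_
      rw [ppulse_eq, entry_eq_sm f _ t hf0 hne, hlog]
      simp only [Nat.add_sub_cancel]
      congr 1
      · have := toNat_two_pow p.toNat
        omega
      · push_cast
        omega
  · have hf : 0 ≤ f := hpre.resolve_right hs0
    by_cases hsf : s ≥ f
    · -- base case A: IM
      rw [stage, if_neg hs0, if_pos hsf, stage_alt_matrix s f hf]
      simp only [IM]
      refine List.map_congr_left fun a _ => ?_
      refine List.map_congr_left fun b _ => ?_
      rw [entry_eq_id s f a b (by omega) (by omega)]
      by_cases h : a = b <;> simp [h, eq_comm]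
    · -- recursive case
      push_neg at hsf
      rw [stage_unfold s f hs0 (by omega) hf, stage_alt_matrix s f hf]
      by_cases hf0 : f = 0
      · subst hf0
        rw [PySem.List.pyRange_one_eq_nil (le_refl 0)]
        have hr1 : PySem.List.pyRange 0 ((2:Int) ^ (0:Int).toNat) 1 = [0] := by
          norm_num [PySem.List.pyRange_one, List.range_one]
        rw [hr1]
        simp only [List.flatMap_nil, List.map_cons, List.map_nil, List.nil_append]
        rw [entry_eq_id s 0 0 0 (by omega) (by omega)]
        norm_num
      · -- 1 ≤ f
        have hf1 : 1 ≤ f := by omega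
        have hfpow := Nat.two_pow_pos f.toNat
        have hlastrow : [List.replicate (2 ^ f.toNat - 1) (0:Int) ++ [1]]
            = [(PySem.List.pyRange 0 ((2:Int) ^ f.toNat) 1).map
                (fun c => entry s f ((2:Int) ^ f.toNat - 1) c)] := by
          congr 1
          have h2f := toNat_two_pow f.toNat
          have hu := unitRow ((2:Int) ^ f.toNat) (by omega)
          have ht : ((2:Int) ^ f.toNat - 1).toNat = 2 ^ f.toNat - 1 := by
            have := toNat_two_pow f.toNat; omega
          rw [ht] at hu
          rw [← hu]
          refine List.map_congr_left fun c _ => ?_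
          by_cases hspos : 0 < s
          · rw [entry_eq_last s f c hspos hsf]
          · rw [entry_eq_id s f _ c (by omega) (by omega)]
            by_cases h : c = 2 ^ f.toNat - 1 <;> simp [h, eq_comm]
        rw [hlastrow]
        refine rowSplit' f hf
          (fun r => (PySem.List.pyRange 0 ((2:Int) ^ f.toNat) 1).map (fun c => entry s f r c))
          (blockA s f)
          (fun p hp0 hpf => ?_)
        -- the p-th block of A is the p-th slice of B's entry matrix
        have hIH : stage (s - 1) p = stage_alt (s - 1) p := by
          refine ih p.toNat (by omega) (s - 1) p rfl (Or.inl hp0)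
        rw [blockA, hIH, stage_alt_matrix (s - 1) p hp0, pad]
        simp only [List.map_map]
        refine List.map_congr_left fun i hi => ?_
        have hi' := (PySem.List.mem_pyRange_one).1 hi
        obtain ⟨hne, hlog⟩ := blockrow_facts p.toNat f.toNat i (by omega) hi'.1 hi'.2
        have hppow := Nat.two_pow_pos p.toNat
        have hple : (2:Nat) ^ (p.toNat + 1) ≤ 2 ^ f.toNat :=
          Nat.pow_le_pow_right (by omega) (by omega)
        have hp2 : (2:Nat) ^ (p.toNat + 1) = 2 ^ p.toNat * 2 := by rw [pow_succ]
        have hpn := toNat_two_pow p.toNat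
        have hfn := toNat_two_pow f.toNat
        by_cases hspos : 0 < s
        · have hrow : ∀ c : Int, entry s f ((2:Int) ^ p.toNat - 1 + i) c
              = (if (2:Int) ^ p.toNat - 1 ≤ c ∧
                    c < (2:Int) ^ p.toNat - 1 + 2 ^ p.toNat
                 then entry (s - 1) p i (c - ((2:Int) ^ p.toNat - 1)) else 0) := by
            intro c
            rw [entry_eq_descend s f _ c hspos hsf hne, hlog]
            by_cases hc : (2:Int) ^ p.toNat - 1 ≤ c ∧ c < (2:Int) ^ p.toNat - 1 + 2 ^ p.toNat
            · rw [if_pos hc, if_pos hc]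
              congr 1
              · omega
              · ring
            · rw [if_neg hc, if_neg hc]
          have := colSplit ((2:Int) ^ f.toNat) ((2:Int) ^ p.toNat - 1) ((2:Int) ^ p.toNat)
            (by omega) (by omega) (by omega)
            (fun x => entry (s - 1) p i x)
          rw [List.map_congr_left (fun c _ => hrow c), this]
          rfl
        · -- s < 0: all remaining levels are identity rows
          have hsneg : s < 0 := by omega
          have hrow : ∀ c : Int, entry s f ((2:Int) ^ p.toNat - 1 + i) c
              = (if (2:Int) ^ p.toNat - 1 ≤ c ∧
                    c < (2:Int) ^ p.toNat - 1 + 2 ^ p.toNat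
                 then entry (s - 1) p i (c - ((2:Int) ^ p.toNat - 1)) else 0) := by
            intro c
            rw [entry_eq_id s f _ c (by omega) (by omega)]
            rw [show ∀ x : Int, entry (s - 1) p i x = if i = x then 1 else 0 from
              fun x => entry_eq_id (s - 1) p i x (by omega) (by omega)]
            split_ifs <;> omega
          have := colSplit ((2:Int) ^ f.toNat) ((2:Int) ^ p.toNat - 1) ((2:Int) ^ p.toNat)
            (by omega) (by omega) (by omega)
            (fun x => entry (s - 1) p i x)
          rw [List.map_congr_left (fun c _ => hrow c), this]
          rfl

-- ===== VERDICT (by name: the statement is the Claim_ definition above) =====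
theorem stage_spec : Claim_equal_stage := by
  intro lnstage lnframe _ hpre
  unfold Spec_stage
  exact main_eq lnframe.toNat lnstage lnframe rfl hpre
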